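-- pv_equiv track=rewrite | github.com/carlossilva2/pyBase | pyBase.py | __check_for_dups
-- ===== SOURCE A (Python) =====
-- def __check_for_dups(data):
--     seen = {}
--     dupes = []
--     for index, item in enumerate(data):
--         if item['id'] not in seen:
--             seen[item['id']] = 1
--         else:
--             if seen[item['id']] >= 1:
--                 dupes.append(index)
--             seen[item['id']] += 1
--     return dupes
-- ===== SOURCE B (Python) =====
-- def __check_for_dups(data):
--     groups = {}
--     for index, item in enumerate(data):
--         groups.setdefault(item['id'], []).append(index)
--     leftovers = []
--     for positions in groups.values():
--         leftovers.extend(positions[1:])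
--     return sorted(leftovers)
-- ===== Notes on version B (the rewrite author's own statement) =====
-- stated objective: alternative
-- what changed: B builds an id -> list-of-indices table in one pass, then flattens each group's tail (every position after the first) and sorts, instead of streaming a seen-counter dict and appending repeat indices on the fly.
import Mathlib
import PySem

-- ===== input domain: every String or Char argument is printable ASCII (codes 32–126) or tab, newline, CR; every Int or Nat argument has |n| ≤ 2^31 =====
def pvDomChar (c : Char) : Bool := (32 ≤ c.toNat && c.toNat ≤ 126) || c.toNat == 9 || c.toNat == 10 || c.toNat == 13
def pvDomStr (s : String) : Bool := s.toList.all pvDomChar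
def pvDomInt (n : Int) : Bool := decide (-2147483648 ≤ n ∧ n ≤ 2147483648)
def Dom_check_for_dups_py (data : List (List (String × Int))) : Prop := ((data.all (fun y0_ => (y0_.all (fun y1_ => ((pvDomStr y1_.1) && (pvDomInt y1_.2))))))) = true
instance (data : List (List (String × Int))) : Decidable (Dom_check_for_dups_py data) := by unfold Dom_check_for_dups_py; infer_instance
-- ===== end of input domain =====

-- B replaces A's streaming seen-counter with a one-pass id→indices table whose per-group
-- tails are flattened and sorted (alternative decomposition, same return value).

-- ===== PORT A =====
-- item['id']: first-match lookup; the default 0 is never reached under Pre_ (key "id" present)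
def pvItemId (item : List (String × Int)) : Int :=
  ((PySem.Dict.mk item).get? "id").getD 0

-- the body of A's 'for index, item in enumerate(data)' loop, on state (seen, dupes)
def pvAStep (st : PySem.Dict Int Int × List Int) (p : Int × List (String × Int)) :
    PySem.Dict Int Int × List Int :=
  let k := pvItemId p.2
  if st.1.contains k = false then
    (st.1.insert k 1, st.2)
  else
    (st.1.insert k (st.1.getD k 0 + 1), st.2 ++ (if 1 ≤ st.1.getD k 0 then [p.1] else []))

def check_for_dups_py (data : List (List (String × Int))) : List Int :=
  ((PySem.List.enumerate data 0).foldl pvAStep (PySem.Dict.empty, [])).2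

-- ===== PORT B =====
def check_for_dups_py_alt (data : List (List (String × Int))) : List Int :=
  let groups : PySem.Dict Int (List Int) :=
    (PySem.List.enumerate data 0).foldl
      (fun g p => g.modify (pvItemId p.2) [] (fun ps => ps ++ [p.1])) PySem.Dict.empty
  let leftovers : List Int :=
    groups.values.foldl (fun acc positions => acc ++ PySem.List.slice positions (some 1) none) []
  PySem.List.sorted leftovers (fun x => x)

-- ===== PRECONDITION & SPEC =====
-- Pre_ excludes exactly the inputs where some item lacks the key "id": there Python A
-- (and Python B alike) raises KeyError.
def Pre_check_for_dups_py (data : List (List (String × Int))) : Prop :=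
  ∀ item ∈ data, (PySem.Dict.mk item).contains "id" = true
instance (data : List (List (String × Int))) : Decidable (Pre_check_for_dups_py data) := by
  unfold Pre_check_for_dups_py; infer_instance

def pvWitness_check_for_dups_py : (List (List (String × Int))) :=
  [[("id", 1)], [("x", 5), ("id", 2)], [("id", 1)]]

def Spec_check_for_dups_py (data : List (List (String × Int))) (out : List Int) : Prop := out = check_for_dups_py_alt data
instance (data : List (List (String × Int))) (out : List Int) : Decidable (Spec_check_for_dups_py data out) := by unfold Spec_check_for_dups_py; infer_instance

-- ===== CLAIM (what is proved, stated in full; the proofs are below) =====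
def Claim_equal_check_for_dups_py : Prop := ∀ (data : List (List (String × Int))), Dom_check_for_dups_py data → Pre_check_for_dups_py data → Spec_check_for_dups_py data (check_for_dups_py data)

-- ===== LEMMAS AND PROOFS =====

-- the indices A appends, as a structural recursion over (index, id) pairs with the
-- list `pre` of ids already seen
def pvDupL (pre : List Int) : List (Int × Int) → List Int
  | [] => []
  | p :: rest => (if p.2 ∈ pre then [p.1] else []) ++ pvDupL (pre ++ [p.2]) rest

lemma pvA_loop (l : List (Int × List (String × Int))) :
    ∀ (pre : List Int) (seen : PySem.Dict Int Int) (dupes : List Int),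
    (∀ k : Int, seen.contains k = decide (k ∈ pre)) →
    (∀ k : Int, k ∈ pre → seen.getD k 0 = pre.count k) →
    (l.foldl pvAStep (seen, dupes)).2 =
      dupes ++ pvDupL pre (l.map (fun p => (p.1, pvItemId p.2))) := by
  induction l with
  | nil => intro pre seen dupes _ _; simp [pvDupL]
  | cons p rest ih =>
    intro pre seen dupes hc hv
    simp only [List.foldl_cons, List.map_cons, pvDupL]
    by_cases hk : pvItemId p.2 ∈ pre
    · have hcon : seen.contains (pvItemId p.2) = true := by rw [hc]; simpa
      have hge : 1 ≤ seen.getD (pvItemId p.2) 0 := by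
        rw [hv _ hk]
        have := List.count_pos_iff.2 hk
        omega
      have hstep : pvAStep (seen, dupes) p =
          (seen.insert (pvItemId p.2) (seen.getD (pvItemId p.2) 0 + 1), dupes ++ [p.1]) := by
        simp [pvAStep, hcon, hge]
      rw [hstep, ih (pre ++ [pvItemId p.2]) _ _ ?_ ?_]
      · simp [hk]
      · intro k
        rw [PySem.Dict.contains_insert, hc]
        by_cases h : k = pvItemId p.2 <;> simp [h]
      · intro k hkmem
        rw [PySem.Dict.getD_insert, List.count_append]
        by_cases h : k = pvItemId p.2
        · subst h; simp [hv _ hk]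
        · have : k ∈ pre := by
            rcases List.mem_append.1 hkmem with h' | h'
            · exact h'
            · simp at h'; exact absurd h' h
          simp [h, hv _ this, List.count_singleton]
          exact fun e => h e.symm
    · have hcon : seen.contains (pvItemId p.2) = false := by rw [hc]; simpa
      have hstep : pvAStep (seen, dupes) p = (seen.insert (pvItemId p.2) 1, dupes) := by
        simp [pvAStep, hcon]
      rw [hstep, ih (pre ++ [pvItemId p.2]) _ _ ?_ ?_]
      · simp [hk]
      · intro k
        rw [PySem.Dict.contains_insert, hc]
        by_cases h : k = pvItemId p.2 <;> simp [h]
      · intro k hkmem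
        rw [PySem.Dict.getD_insert, List.count_append]
        by_cases h : k = pvItemId p.2
        · subst h
          simp [List.count_eq_zero.2 hk]
        · have : k ∈ pre := by
            rcases List.mem_append.1 hkmem with h' | h'
            · exact h'
            · simp at h'; exact absurd h' h
          simp [h, hv _ this, List.count_singleton]
          exact fun e => h e.symm

lemma pvEnum_map {α β : Type} (g : α → β) (data : List α) :
    ∀ (m : Int),
    (PySem.List.enumerate data m).map (fun p => (p.1, g p.2)) =
      PySem.List.enumerate (data.map g) m := by
  induction data with
  | nil => intro m; simp [PySem.List.enumerate_nil]
  | cons x xs ih => intro m; simp [PySem.List.enumerate_cons, ih]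

lemma pvA_eq (data : List (List (String × Int))) :
    check_for_dups_py data =
      pvDupL [] (PySem.List.enumerate (data.map pvItemId) 0) := by
  rw [check_for_dups_py, pvA_loop _ [] _ [] (by simp [PySem.Dict.contains_empty]) (by simp),
    pvEnum_map]
  simp

lemma pvMem_dupL (rest : List Int) :
    ∀ (pre : List Int) (m i : Int),
    (i ∈ pvDupL pre (PySem.List.enumerate rest m) ↔
      ∃ (t : Nat) (h : t < rest.length), i = m + t ∧ rest[t] ∈ pre ++ rest.take t) := by
  induction rest with
  | nil => intro pre m i; simp [PySem.List.enumerate_nil, pvDupL]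
  | cons k rest ih =>
    intro pre m i
    rw [PySem.List.enumerate_cons]
    simp only [pvDupL, List.mem_append]
    constructor
    · rintro (hx | hx)
      · refine ⟨0, by simp, ?_, ?_⟩
        · revert hx; split_ifs with h <;> simp_all
        · revert hx; split_ifs with h <;> simp_all
      · obtain ⟨t, ht, hi, hmem⟩ := (ih (pre ++ [k]) (m + 1) i).1 hx
        refine ⟨t + 1, by simpa using ht, by push_cast; omega, ?_⟩
        simpa [List.append_assoc] using hmem
    · rintro ⟨t, ht, hi, hmem⟩
      cases t with
      | zero =>
        left
        simp at hmem hi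
        simp [hmem, hi]
      | succ s =>
        right
        refine (ih (pre ++ [k]) (m + 1) i).2 ⟨s, by simpa using ht, by push_cast at hi ⊢; omega, ?_⟩
        simpa [List.append_assoc] using hmem

lemma pvDupL_ge (rest : List Int) (pre : List Int) (m i : Int)
    (h : i ∈ pvDupL pre (PySem.List.enumerate rest m)) : m ≤ i := by
  obtain ⟨t, ht, hi, -⟩ := (pvMem_dupL rest pre m i).1 h
  omega

lemma pvPairwise_dupL (rest : List Int) :
    ∀ (pre : List Int) (m : Int),
    (pvDupL pre (PySem.List.enumerate rest m)).Pairwise (· < ·) := by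
  induction rest with
  | nil => intro pre m; simp [PySem.List.enumerate_nil, pvDupL]
  | cons k rest ih =>
    intro pre m
    rw [PySem.List.enumerate_cons]
    simp only [pvDupL]
    refine List.pairwise_append.2 ⟨?_, ih _ _, ?_⟩
    · split_ifs <;> simp
    · intro a ha b hb
      have hb' : m + 1 ≤ b := pvDupL_ge _ _ _ _ hb
      have ha' : a = m := by revert ha; split_ifs <;> simp_all
      omega

lemma pvValues_eq {κ ν : Type} [BEq κ] [LawfulBEq κ] (d : PySem.Dict κ ν) (d0 : ν)
    (h : d.keys.Nodup) : d.values = d.keys.map (fun k => d.getD k d0) := by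
  show d.items.map (fun p => p.2) = (d.items.map (fun p => p.1)).map (fun k => d.getD k d0)
  rw [List.map_map]
  refine List.map_congr_left (fun p hp => ?_)
  exact (PySem.Dict.getD_of_mem_items d (by simpa using hp) h d0).symm

-- the positions list B's table stores for id k, in index order
def pvPosns (ids : List Int) (k : Int) : List Int :=
  ((PySem.List.enumerate ids 0).filter (fun q => q.2 == k)).map (fun q => q.1)

lemma pvGroups_getD (data : List (List (String × Int))) (k : Int) :
    ((PySem.List.enumerate data 0).foldl
      (fun g p => g.modify (pvItemId p.2) [] (fun ps => ps ++ [p.1]))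
      (PySem.Dict.empty : PySem.Dict Int (List Int))).getD k [] = pvPosns (data.map pvItemId) k := by
  have h1 : (PySem.List.enumerate data 0).foldl
      (fun g p => g.modify (pvItemId p.2) [] (fun ps => ps ++ [p.1]))
      (PySem.Dict.empty : PySem.Dict Int (List Int)) =
      (((PySem.List.enumerate data 0).map (fun p => (pvItemId p.2, p.1))).foldl
        (fun g q => g.modify q.1 [] (fun ps => ps ++ [q.2])) PySem.Dict.empty) := by
    rw [List.foldl_map]
  rw [h1, PySem.Dict.getD_foldl_modify_append]
  have h2 : (PySem.List.enumerate data 0).map (fun p => (pvItemId p.2, p.1)) =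
      (PySem.List.enumerate (data.map pvItemId) 0).map (fun q => (q.2, q.1)) := by
    rw [← pvEnum_map pvItemId data 0, List.map_map]
    rfl
  rw [h2, List.filter_map, List.map_map]
  simp [pvPosns, PySem.Dict.getD_empty, Function.comp_def]

lemma pvGroups_keys (data : List (List (String × Int))) :
    ((PySem.List.enumerate data 0).foldl
      (fun g p => g.modify (pvItemId p.2) [] (fun ps => ps ++ [p.1]))
      (PySem.Dict.empty : PySem.Dict Int (List Int))).keys =
      PySem.Set.ofList (data.map pvItemId) := by
  have hk := PySem.Dict.keys_foldl_modify_key (PySem.List.enumerate data 0)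
    (fun p => pvItemId p.2) ([] : List Int) (fun g p ps => ps ++ [p.1]) PySem.Dict.empty
  rw [hk]
  have : (PySem.List.enumerate data 0).map (fun p => pvItemId p.2) = data.map pvItemId := by
    have := pvEnum_map pvItemId data 0
    calc (PySem.List.enumerate data 0).map (fun p => pvItemId p.2)
        = ((PySem.List.enumerate data 0).map (fun p => (p.1, pvItemId p.2))).map (fun q => q.2) := by
          rw [List.map_map]; rfl
      _ = data.map pvItemId := by rw [this, PySem.List.map_snd_enumerate]
  rw [this, PySem.Dict.keys_empty]
  exact PySem.Set.update_nil_left _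

lemma pvMem_posns (ids : List Int) (k x : Int) :
    x ∈ pvPosns ids k ↔ ∃ (t : Nat) (h : t < ids.length), x = (t : Int) ∧ ids[t] = k := by
  simp only [pvPosns, List.mem_map, List.mem_filter, PySem.List.mem_enumerate_iff]
  constructor
  · rintro ⟨q, ⟨⟨t, ht, rfl⟩, hq⟩, rfl⟩
    refine ⟨t, ht, by simp, by simpa using hq⟩
  · rintro ⟨t, ht, rfl, hk⟩
    exact ⟨(0 + (t : Int), ids[t]), ⟨⟨t, ht, rfl⟩, by simpa using hk⟩, by simp⟩

lemma pvPosns_pairwise (ids : List Int) (k : Int) : (pvPosns ids k).Pairwise (· < ·) := by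
  refine List.pairwise_map.2 ?_
  exact (PySem.List.pairwise_lt_enumerate ids 0).sublist List.filter_sublist

lemma pvMem_drop_one {l : List Int} (h : l.Pairwise (· < ·)) (x : Int) :
    x ∈ l.drop 1 ↔ x ∈ l ∧ ∃ y ∈ l, y < x := by
  cases l with
  | nil => simp
  | cons a t =>
    simp only [List.drop_one, List.tail_cons, List.mem_cons]
    have ha : ∀ y ∈ t, a < y := (List.pairwise_cons.1 h).1
    constructor
    · intro hx
      exact ⟨Or.inr hx, a, Or.inl rfl, ha x hx⟩
    · rintro ⟨hx, y, hy, hyx⟩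
      rcases hx with rfl | hx
      · rcases hy with rfl | hy
        · omega
        · exact absurd (ha y hy) (by omega)
      · exact hx

lemma pvMem_posns_drop (ids : List Int) (k x : Int) :
    x ∈ (pvPosns ids k).drop 1 ↔
      ∃ (t : Nat) (h : t < ids.length), x = (t : Int) ∧ ids[t] = k ∧ ids[t] ∈ ids.take t := by
  rw [pvMem_drop_one (pvPosns_pairwise ids k)]
  constructor
  · rintro ⟨hx, y, hy, hyx⟩
    obtain ⟨t, ht, rfl, hk⟩ := (pvMem_posns ids k x).1 hx
    obtain ⟨s, hs, rfl, hk'⟩ := (pvMem_posns ids k y).1 hy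
    refine ⟨t, ht, rfl, hk, ?_⟩
    rw [List.mem_take_iff_getElem]
    exact ⟨s, by omega, by rw [hk', hk]⟩
  · rintro ⟨t, ht, rfl, hk, htk⟩
    obtain ⟨s, hs, hsk⟩ := List.mem_take_iff_getElem.1 htk
    refine ⟨(pvMem_posns ids k _).2 ⟨t, ht, rfl, hk⟩, (s : Int), ?_, by omega⟩
    exact (pvMem_posns ids k _).2 ⟨s, by omega, rfl, by rw [hsk, hk]⟩

lemma pvSlice1 (ps : List Int) : PySem.List.slice ps (some 1) none = ps.drop 1 := by
  rw [PySem.List.slice_from ps (by norm_num)]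
  norm_num

lemma pvFoldl_tails (L : List (List Int)) :
    L.foldl (fun acc ps => acc ++ PySem.List.slice ps (some 1) none) [] =
      (L.map (fun ps => ps.drop 1)).flatten := by
  have h1 : L.foldl (fun acc ps => acc ++ PySem.List.slice ps (some 1) none) [] =
      (L.map (fun ps => ps.drop 1)).foldl (fun acc x => acc ++ x) [] := by
    rw [List.foldl_map]
    simp only [pvSlice1]
  rw [h1, PySem.List.foldl_append_eq_flatten]
  simp

lemma pvB_eq (data : List (List (String × Int))) :
    check_for_dups_py_alt data =
      pvDupL [] (PySem.List.enumerate (data.map pvItemId) 0) := by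
  have hnk : ((PySem.List.enumerate data 0).foldl
      (fun g p => g.modify (pvItemId p.2) [] (fun ps => ps ++ [p.1]))
      (PySem.Dict.empty : PySem.Dict Int (List Int))).keys.Nodup :=
    PySem.Dict.nodup_keys_foldl_modify_key (PySem.List.enumerate data 0)
      (fun p => pvItemId p.2) ([] : List Int) (fun g p ps => ps ++ [p.1]) PySem.Dict.empty
      PySem.Dict.nodup_keys_empty
  have hvals : ((PySem.List.enumerate data 0).foldl
      (fun g p => g.modify (pvItemId p.2) [] (fun ps => ps ++ [p.1]))
      (PySem.Dict.empty : PySem.Dict Int (List Int))).values =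
      (PySem.Set.ofList (data.map pvItemId)).map (fun k => pvPosns (data.map pvItemId) k) := by
    rw [pvValues_eq _ ([] : List Int) hnk, pvGroups_keys]
    exact List.map_congr_left (fun k _ => pvGroups_getD data k)
  show PySem.List.sorted
      (((PySem.List.enumerate data 0).foldl
        (fun g p => g.modify (pvItemId p.2) [] (fun ps => ps ++ [p.1]))
        (PySem.Dict.empty : PySem.Dict Int (List Int))).values.foldl
        (fun acc positions => acc ++ PySem.List.slice positions (some 1) none) [])
      (fun x => x) = _
  rw [hvals, pvFoldl_tails, List.map_map]
  simp only [Function.comp_def]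
  set ids := data.map pvItemId with hids
  have hmem : ∀ i : Int,
      i ∈ ((PySem.Set.ofList ids).map (fun k => (pvPosns ids k).drop 1)).flatten ↔
        i ∈ pvDupL [] (PySem.List.enumerate ids 0) := by
    intro i
    rw [pvMem_dupL]
    simp only [List.mem_flatten, List.mem_map]
    constructor
    · rintro ⟨l, ⟨k, hk, rfl⟩, hil⟩
      obtain ⟨t, ht, rfl, hkt, htk⟩ := (pvMem_posns_drop ids k _).1 hil
      exact ⟨t, ht, by simp, by simpa using htk⟩
    · rintro ⟨t, ht, hi, htk⟩
      refine ⟨(pvPosns ids ids[t]).drop 1, ⟨ids[t], ?_, rfl⟩, ?_⟩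
      · exact (PySem.Set.mem_ofList ids _).2 (List.getElem_mem ht)
      · exact (pvMem_posns_drop ids _ _).2 ⟨t, ht, by omega, rfl, by simpa using htk⟩
  have hpwA : (pvDupL [] (PySem.List.enumerate ids 0)).Pairwise (· < ·) :=
    pvPairwise_dupL ids [] 0
  have hndA : (pvDupL [] (PySem.List.enumerate ids 0)).Nodup :=
    hpwA.imp (fun h => ne_of_lt h)
  have hndL : ((PySem.Set.ofList ids).map (fun k => (pvPosns ids k).drop 1)).flatten.Nodup := by
    rw [List.nodup_flatten]
    constructor
    · rintro l hl
      simp only [List.mem_map] at hl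
      obtain ⟨k, -, rfl⟩ := hl
      exact ((pvPosns_pairwise ids k).sublist (List.drop_sublist 1 _)).imp (fun h => ne_of_lt h)
    · refine List.pairwise_map.2 ((PySem.Set.nodup_ofList ids).imp ?_)
      intro k k' hne x hx hx'
      obtain ⟨t, ht, rfl, hkt, -⟩ := (pvMem_posns_drop ids k _).1 hx
      obtain ⟨t', ht', he, hkt', -⟩ := (pvMem_posns_drop ids k' _).1 hx'
      obtain rfl : t = t' := by omega
      exact hne (by rw [← hkt, ← hkt'])
  have hperm : (pvDupL [] (PySem.List.enumerate ids 0)).Perm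
      ((PySem.Set.ofList ids).map (fun k => (pvPosns ids k).drop 1)).flatten :=
    (List.perm_ext_iff_of_nodup hndA hndL).2 (fun a => ((hmem a).symm))
  exact PySem.List.sorted_eq_of_perm_of_pairwise_lt _ _ _ hperm hpwA

-- ===== VERDICT (by name: the statement is the Claim_ definition above) =====
theorem check_for_dups_py_spec : Claim_equal_check_for_dups_py := by
  intro data _ _
  unfold Spec_check_for_dups_py
  rw [pvA_eq, pvB_eq]
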